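-- pv_equiv track=rewrite | github.com/TheWorldAvatar/mcp-tool-layer | src/mcp_servers/sparql/chemical_fuzzy_search.py | hill_string
-- ===== SOURCE A (Python) =====
-- from collections import Counter
--
-- HILL_ORDER = [
--     "C", "H", "N", "O", "F", "P", "S", "Cl", "Br", "I",
--     "B", "Si", "Se", "Sb", "Te", "Mo", "Co", "V", "Cu", "Pd",
--     "Al", "Ca", "Fe", "Ni", "Zn", "Ag", "Cd", "Sn", "Pb", "Mn",
--     "Cr", "Ti", "Zr", "Hf", "Nb", "Ta", "W", "Re", "Os", "Ir",
--     "Pt", "Au", "Hg", "Tl", "Bi", "Po", "At", "Rn", "Li", "Be",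
--     "Na", "Mg", "K", "Rb", "Cs", "Ba", "Ra"
-- ]
--
-- def hill_string(atoms: Counter) -> str:
--     """
--     Convert atomic composition to Hill notation formula.
--
--     Args:
--         atoms (Counter): Dictionary of element -> count
--
--     Returns:
--         str: Formula in Hill notation (C and H first, then alphabetical)
--     """
--     parts = []
--     rest = atoms.copy()
--
--     # C and H come first in Hill notation
--     c = rest.pop("C", 0)
--     h = rest.pop("H", 0)
--     if c:
--         parts.append("C" + (str(c) if c > 1 else ""))
--     if h:
--         parts.append("H" + (str(h) if h > 1 else ""))
--
--     # Then elements in Hill order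
--     for e in HILL_ORDER:
--         if e in ("C", "H"):
--             continue
--         n = rest.pop(e, 0)
--         if n:
--             parts.append(e + (str(n) if n > 1 else ""))
--
--     # Finally, any remaining elements alphabetically
--     for e in sorted(rest):
--         n = rest[e]
--         if n:
--             parts.append(e + (str(n) if n > 1 else ""))
--
--     return "".join(parts) if parts else ""
-- ===== SOURCE B (Python) =====
-- from collections import Counter
--
-- HILL_ORDER = [
--     "C", "H", "N", "O", "F", "P", "S", "Cl", "Br", "I",
--     "B", "Si", "Se", "Sb", "Te", "Mo", "Co", "V", "Cu", "Pd",
--     "Al", "Ca", "Fe", "Ni", "Zn", "Ag", "Cd", "Sn", "Pb", "Mn",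
--     "Cr", "Ti", "Zr", "Hf", "Nb", "Ta", "W", "Re", "Os", "Ir",
--     "Pt", "Au", "Hg", "Tl", "Bi", "Po", "At", "Rn", "Li", "Be",
--     "Na", "Mg", "K", "Rb", "Cs", "Ba", "Ra"
-- ]
--
--
-- def hill_string(atoms: Counter) -> str:
--     rank = {e: i for i, e in enumerate(HILL_ORDER)}
--     parts = []
--     for e in sorted(atoms, key=lambda e: (rank.get(e, len(HILL_ORDER)), e)):
--         n = atoms[e]
--         if n:
--             parts.append(e + (str(n) if n > 1 else ""))
--     return "".join(parts)
-- ===== Notes on version B (the rewrite author's own statement) =====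
-- stated objective: simpler
-- what changed: Replaces A's three emission passes over a mutated copy of the dict (pop C/H, pop along the fixed HILL_ORDER scan, then an alphabetical pass over the leftovers) with one rank-table sort of the present keys by (rank.get(e, len(HILL_ORDER)), e) followed by a single emission loop.
import Mathlib
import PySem

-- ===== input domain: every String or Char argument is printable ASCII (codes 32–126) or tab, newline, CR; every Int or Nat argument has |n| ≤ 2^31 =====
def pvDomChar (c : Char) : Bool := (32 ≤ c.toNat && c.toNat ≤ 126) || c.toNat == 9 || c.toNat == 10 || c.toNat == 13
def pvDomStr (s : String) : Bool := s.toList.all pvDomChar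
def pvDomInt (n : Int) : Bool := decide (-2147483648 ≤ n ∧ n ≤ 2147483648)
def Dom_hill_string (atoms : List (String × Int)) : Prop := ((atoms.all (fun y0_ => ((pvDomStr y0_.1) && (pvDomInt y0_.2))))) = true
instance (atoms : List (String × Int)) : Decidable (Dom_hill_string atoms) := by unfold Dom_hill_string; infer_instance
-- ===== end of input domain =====

-- B replaces A's pop-based fixed scan over HILL_ORDER (plus a final alphabetical pass) by one
-- rank-keyed sort of the present keys; objective: simpler (one emission loop instead of three).

-- ===== PORT A =====
-- HILL_ORDER (module constant)
def hillOrder : List String :=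
  ["C", "H", "N", "O", "F", "P", "S", "Cl", "Br", "I",
   "B", "Si", "Se", "Sb", "Te", "Mo", "Co", "V", "Cu", "Pd",
   "Al", "Ca", "Fe", "Ni", "Zn", "Ag", "Cd", "Sn", "Pb", "Mn",
   "Cr", "Ti", "Zr", "Hf", "Nb", "Ta", "W", "Re", "Os", "Ir",
   "Pt", "Au", "Hg", "Tl", "Bi", "Po", "At", "Rn", "Li", "Be",
   "Na", "Mg", "K", "Rb", "Cs", "Ba", "Ra"]

-- literal port of A: dict parameter = association list made into a PySem.Dict;
-- rest.pop(e, 0) = getD then erase; 'if n:' is n ≠ 0; rest[e] in the last loop is exact as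
-- getD because e ranges over rest's keys.
def hill_string (atoms : List (String × Int)) : String :=
  let rest0 := PySem.Dict.ofList atoms
  let c := rest0.getD "C" 0
  let rest1 := rest0.erase "C"
  let h := rest1.getD "H" 0
  let rest2 := rest1.erase "H"
  let parts1 : List String :=
    if c ≠ 0 then [] ++ ["C" ++ (if c > 1 then PySem.Int.toStr c else "")] else []
  let parts2 : List String :=
    if h ≠ 0 then parts1 ++ ["H" ++ (if h > 1 then PySem.Int.toStr h else "")] else parts1
  let st := hillOrder.foldl
    (fun (st : List String × PySem.Dict String Int) e =>
      if e = "C" ∨ e = "H" then st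
      else
        let n := st.2.getD e 0
        let rest' := st.2.erase e
        (if n ≠ 0 then st.1 ++ [e ++ (if n > 1 then PySem.Int.toStr n else "")] else st.1, rest'))
    (parts2, rest2)
  let parts4 := (PySem.List.sorted st.2.keys (fun x => x) false).foldl
    (fun parts e =>
      let n := st.2.getD e 0
      if n ≠ 0 then parts ++ [e ++ (if n > 1 then PySem.Int.toStr n else "")] else parts)
    st.1
  if parts4 ≠ [] then PySem.Str.join "" parts4 else ""

-- ===== PORT B =====
-- literal port of B (Source B): build the rank dict once from enumerate(HILL_ORDER), sort the dict's
-- keys by (rank.get(e, len(HILL_ORDER)), e), one emission loop; atoms[e] is exact as getD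
-- because e ranges over the dict's keys.
def hill_string_alt (atoms : List (String × Int)) : String :=
  let d := PySem.Dict.ofList atoms
  let rank := (PySem.List.enumerate hillOrder).foldl
    (fun (r : PySem.Dict String Int) p => r.insert p.2 p.1) PySem.Dict.empty
  let parts := (PySem.List.sorted2 d.keys
      (fun e => rank.getD e (PySem.List.len hillOrder)) (fun e => e) false).foldl
    (fun parts e =>
      let n := d.getD e 0
      if n ≠ 0 then parts ++ [e ++ (if n > 1 then PySem.Int.toStr n else "")] else parts)
    []
  PySem.Str.join "" parts

-- ===== PRECONDITION & SPEC =====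
def Spec_hill_string (atoms : List (String × Int)) (out : String) : Prop := out = hill_string_alt atoms
instance (atoms : List (String × Int)) (out : String) : Decidable (Spec_hill_string atoms out) := by unfold Spec_hill_string; infer_instance

-- ===== CLAIM =====
def Claim_equal_hill_string : Prop := ∀ (atoms : List (String × Int)), Dom_hill_string atoms → Spec_hill_string atoms (hill_string atoms)

-- ===== LEMMAS AND PROOFS =====

theorem pv_get?_erase_of_ne {κ ν : Type} [BEq κ] [LawfulBEq κ] (d : PySem.Dict κ ν) (k k' : κ)
    (h : k' ≠ k) : (d.erase k).get? k' = d.get? k' := by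
  obtain ⟨items⟩ := d
  simp only [PySem.Dict.erase, PySem.Dict.get?, List.find?_filter]
  have : (fun (a : κ × ν) => decide ((!(a.1 == k)) = true ∧ (a.1 == k') = true)) = fun a => a.1 == k' := by
    funext a
    by_cases ha : a.1 = k' <;> simp [ha, h]
  rw [this]

theorem pv_keys_erase {κ ν : Type} [BEq κ] [LawfulBEq κ] (d : PySem.Dict κ ν) (k : κ) :
    (d.erase k).keys = d.keys.filter (fun x => !(x == k)) := by
  obtain ⟨items⟩ := d
  simp only [PySem.Dict.erase, PySem.Dict.keys]
  induction items with
  | nil => rfl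
  | cons p t ih =>
    by_cases hp : p.1 = k <;> simp [hp, ih]

theorem pv_getD_erase_of_ne {κ ν : Type} [BEq κ] [LawfulBEq κ] (d : PySem.Dict κ ν) (k k' : κ)
    (v : ν) (h : k' ≠ k) : (d.erase k).getD k' v = d.getD k' v := by
  simp [PySem.Dict.getD, pv_get?_erase_of_ne d k k' h]

theorem pv_getD_foldl_erase (L : List String) (d : PySem.Dict String Int) (k : String)
    (h : k ∉ L) : (L.foldl (fun d e => d.erase e) d).getD k 0 = d.getD k 0 := by
  induction L generalizing d with
  | nil => rfl
  | cons a t ih =>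
    simp only [List.foldl_cons]
    rw [ih _ (by simp_all), pv_getD_erase_of_ne _ _ _ _ (by simp_all)]

theorem pv_keys_foldl_erase (L : List String) (d : PySem.Dict String Int) :
    (L.foldl (fun d e => d.erase e) d).keys = d.keys.filter (fun x => !decide (x ∈ L)) := by
  induction L generalizing d with
  | nil => simp
  | cons a t ih =>
    simp only [List.foldl_cons]
    rw [ih, pv_keys_erase, List.filter_filter]
    apply List.filter_congr
    intro x _
    by_cases hx : x = a <;> simp [hx]

theorem pv_emit_loop (d : PySem.Dict String Int) (L : List String) (parts : List String) :
    L.foldl (fun parts e =>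
        if d.getD e 0 ≠ 0 then parts ++ [e ++ (if d.getD e 0 > 1 then PySem.Int.toStr (d.getD e 0) else "")]
        else parts) parts
    = parts ++ (L.filter (fun e => decide (d.getD e 0 ≠ 0))).map
        (fun e => e ++ (if d.getD e 0 > 1 then PySem.Int.toStr (d.getD e 0) else "")) := by
  induction L generalizing parts with
  | nil => simp
  | cons a t ih =>
    simp only [List.foldl_cons, List.filter_cons]
    rw [ih]
    by_cases h : d.getD a 0 ≠ 0 <;> simp [h]

theorem pv_loopA (L : List String) (hnd : L.Nodup) (parts : List String)
    (rest : PySem.Dict String Int) :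
    L.foldl (fun (st : List String × PySem.Dict String Int) e =>
        if e = "C" ∨ e = "H" then st
        else
          (if st.2.getD e 0 ≠ 0 then
             st.1 ++ [e ++ (if st.2.getD e 0 > 1 then PySem.Int.toStr (st.2.getD e 0) else "")]
           else st.1, st.2.erase e))
      (parts, rest)
    = (parts ++ ((L.filter (fun e => !decide (e = "C" ∨ e = "H"))).filter
          (fun e => decide (rest.getD e 0 ≠ 0))).map
          (fun e => e ++ (if rest.getD e 0 > 1 then PySem.Int.toStr (rest.getD e 0) else "")),
       (L.filter (fun e => !decide (e = "C" ∨ e = "H"))).foldl (fun d e => d.erase e) rest) := by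
  induction L generalizing parts rest with
  | nil => simp
  | cons a t ih =>
    simp only [List.foldl_cons, List.filter_cons]
    by_cases hch : a = "C" ∨ a = "H"
    · rw [if_pos hch]
      rw [ih (List.nodup_cons.mp hnd).2]
      simp [hch]
    · rw [if_neg hch]
      have hat : a ∉ t := (List.nodup_cons.mp hnd).1
      have htnd : t.Nodup := (List.nodup_cons.mp hnd).2
      rw [ih htnd]
      have hgd : ∀ e ∈ t.filter (fun e => !decide (e = "C" ∨ e = "H")),
          (rest.erase a).getD e 0 = rest.getD e 0 := by
        intro e he
        exact pv_getD_erase_of_ne _ _ _ _ (by rintro rfl; exact hat (List.mem_of_mem_filter he))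
      have h1 : List.filter (fun e => decide ((rest.erase a).getD e 0 ≠ 0))
            (t.filter (fun e => !decide (e = "C" ∨ e = "H")))
          = List.filter (fun e => decide (rest.getD e 0 ≠ 0))
            (t.filter (fun e => !decide (e = "C" ∨ e = "H"))) :=
        List.filter_congr (fun e he => by rw [hgd e he])
      have h2 : (List.filter (fun e => decide (rest.getD e 0 ≠ 0))
            (t.filter (fun e => !decide (e = "C" ∨ e = "H")))).map
            (fun e => e ++ if (rest.erase a).getD e 0 > 1 then PySem.Int.toStr ((rest.erase a).getD e 0) else "")
          = (List.filter (fun e => decide (rest.getD e 0 ≠ 0))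
            (t.filter (fun e => !decide (e = "C" ∨ e = "H")))).map
            (fun e => e ++ if rest.getD e 0 > 1 then PySem.Int.toStr (rest.getD e 0) else "") :=
        List.map_eq_map_iff.mpr (fun e he => by rw [hgd e (List.mem_of_mem_filter he)])
      simp only [h1, h2]
      by_cases hk : rest.getD a 0 ≠ 0 <;> simp [hch, hk]

def pvRank : PySem.Dict String Int :=
  (PySem.List.enumerate hillOrder).foldl
    (fun (r : PySem.Dict String Int) p => r.insert p.2 p.1) PySem.Dict.empty

set_option maxRecDepth 4096 in
theorem pv_rank_lt : ∀ e ∈ hillOrder, pvRank.getD e 57 < 57 := by decide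

set_option maxRecDepth 16384 in
set_option maxHeartbeats 1000000 in
theorem pv_rank_pairwise :
    hillOrder.Pairwise (fun a b => pvRank.getD a 57 < pvRank.getD b 57) := by decide

theorem pv_hillOrder_nodup : hillOrder.Nodup := by decide

theorem pv_rank_not_mem (e : String) (h : e ∉ hillOrder) : pvRank.getD e 57 = 57 := by
  apply PySem.Dict.getD_of_not_contains
  have hk : pvRank.keys = PySem.Set.update PySem.Dict.empty.keys
      ((PySem.List.enumerate hillOrder).map (fun p => p.2)) :=
    PySem.Dict.keys_foldl_insert_key _ _ _ _
  by_cases hc : pvRank.contains e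
  · exfalso
    have := (PySem.Dict.contains_iff_mem_keys _ _).mp hc
    rw [hk] at this
    simp only [PySem.Dict.keys_empty, PySem.List.map_snd_enumerate] at this
    exact h (by simpa [PySem.Set.mem_update] using this)
  · simpa using hc

theorem pv_sorted2_eq_sorted (xs : List String) (k1 : String → Int) :
    PySem.List.sorted2 xs k1 (fun e => e) false
    = PySem.List.sorted xs (fun e => toLex ((k1 e, e) : Int × String)) false := by
  rw [PySem.List.sorted_eq_foldl_insertBy]
  unfold PySem.List.sorted2
  simp only [Bool.false_eq_true, if_false]
  have hb : (fun a b => decide (k1 a < k1 b) || (!decide (k1 b < k1 a) && decide (a < b)))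
      = (fun a b : String =>
          decide (toLex ((k1 a, a) : Int × String) < toLex ((k1 b, b) : Int × String))) := by
    funext a b
    by_cases h1 : k1 a < k1 b
    · simp [h1, Prod.Lex.lt_iff]
    · by_cases h2 : k1 b < k1 a
      · simp [h1, h2, Prod.Lex.lt_iff, ne_of_gt h2]
      · have he : k1 a = k1 b := le_antisymm (not_lt.mp h2) (not_lt.mp h1)
        simp [Prod.Lex.lt_iff, he]
  rw [hb]

set_option maxRecDepth 8192 in
theorem pv_sorted_keys (ks : List String) (hnd : ks.Nodup) :
    PySem.List.sorted ks (fun e => toLex ((pvRank.getD e 57, e) : Int × String)) false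
    = hillOrder.filter (fun e => decide (e ∈ ks))
      ++ PySem.List.sorted (ks.filter (fun e => !decide (e ∈ hillOrder))) (fun x => x) false := by
  apply PySem.List.sorted_eq_of_perm_of_pairwise_lt
  · have p1 : (hillOrder.filter (fun e => decide (e ∈ ks))).Perm
        (ks.filter (fun e => decide (e ∈ hillOrder))) :=
      (List.perm_ext_iff_of_nodup (pv_hillOrder_nodup.filter _) (hnd.filter _)).mpr
        (by intro x; simp [and_comm])
    have p2 : (PySem.List.sorted (ks.filter (fun e => !decide (e ∈ hillOrder)))
        (fun x => x) false).Perm (ks.filter (fun e => !decide (e ∈ hillOrder))) :=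
      PySem.List.sorted_perm _ _ _
    exact (p1.append p2).trans (List.filter_append_perm _ ks)
  · rw [List.pairwise_append]
    refine ⟨?_, ?_, ?_⟩
    · exact (pv_rank_pairwise.sublist List.filter_sublist).imp
        (fun h => Prod.Lex.lt_iff.mpr (Or.inl h))
    · have hle : (PySem.List.sorted (ks.filter (fun e => !decide (e ∈ hillOrder)))
          (fun x => x) false).Pairwise (fun a b => a ≤ b) :=
        PySem.List.sorted_pairwise _ _
      have hnd2 : (PySem.List.sorted (ks.filter (fun e => !decide (e ∈ hillOrder)))
          (fun x => x) false).Nodup :=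
        ((PySem.List.sorted_perm _ _ _).nodup_iff).mpr (hnd.filter _)
      refine (hle.and hnd2).imp_of_mem ?_
      intro a b ha hb hab
      have hra : pvRank.getD a 57 = 57 := pv_rank_not_mem a (by
        have := (PySem.List.mem_sorted _ _ _ _).mp ha
        simpa using (List.mem_filter.mp this).2)
      have hrb : pvRank.getD b 57 = 57 := pv_rank_not_mem b (by
        have := (PySem.List.mem_sorted _ _ _ _).mp hb
        simpa using (List.mem_filter.mp this).2)
      exact Prod.Lex.lt_iff.mpr (Or.inr ⟨by simp [hra, hrb], lt_of_le_of_ne hab.1 hab.2⟩)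
    · intro a ha b hb
      have hra : pvRank.getD a 57 < 57 := pv_rank_lt a (List.mem_of_mem_filter ha)
      have hrb : pvRank.getD b 57 = 57 := pv_rank_not_mem b (by
        have := (PySem.List.mem_sorted _ _ _ _).mp hb
        simpa using (List.mem_filter.mp this).2)
      exact Prod.Lex.lt_iff.mpr (Or.inl (by simp only [ofLex_toLex]; omega))


def pvKeep (d : PySem.Dict String Int) (e : String) : Bool := decide (d.getD e 0 ≠ 0)

def pvPc (d : PySem.Dict String Int) (e : String) : String :=
  e ++ (if d.getD e 0 > 1 then PySem.Int.toStr (d.getD e 0) else "")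

def pvList (atoms : List (String × Int)) : List String :=
  let d := PySem.Dict.ofList atoms
  ((hillOrder.filter (fun e => decide (e ∈ d.keys))
    ++ PySem.List.sorted (d.keys.filter (fun e => !decide (e ∈ hillOrder))) (fun x => x) false).filter
      (pvKeep d)).map (pvPc d)

theorem pv_A_parts (atoms : List (String × Int)) :
    hill_string atoms = if pvList atoms ≠ [] then PySem.Str.join "" (pvList atoms) else "" := by
  simp only [hill_string]
  rw [pv_loopA hillOrder pv_hillOrder_nodup]
  simp only []
  rw [pv_emit_loop]
  set d := PySem.Dict.ofList atoms with hd
  rw [show List.filter (fun e => !decide (e = "C" ∨ e = "H")) hillOrder = hillOrder.drop 2 from by decide]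
  rw [pv_getD_erase_of_ne d "C" "H" 0 (by decide)]
  rw [pv_keys_foldl_erase, pv_keys_erase, pv_keys_erase, List.filter_filter, List.filter_filter]
  have hm : ∀ x : String, x ∈ hillOrder ↔ x = "C" ∨ x = "H" ∨ x ∈ List.drop 2 hillOrder := by
    intro x
    conv_lhs => rw [show hillOrder = "C" :: "H" :: List.drop 2 hillOrder from rfl]
    simp [List.mem_cons]
  have hcd : ∀ e ∈ List.drop 2 hillOrder, e ≠ "C" ∧ e ≠ "H" := by decide
  have hk : List.filter (fun a => !decide (a ∈ List.drop 2 hillOrder) && !(a == "H") && !(a == "C")) d.keys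
      = List.filter (fun e => !decide (e ∈ hillOrder)) d.keys :=
    List.filter_congr (fun x _ => by
      by_cases h1 : x = "C" <;> by_cases h2 : x = "H" <;>
        by_cases h3 : x ∈ List.drop 2 hillOrder <;> simp [h1, h2, h3, hm])
  rw [hk]
  -- the getD value of the fully-erased dict agrees with d outside hillOrder
  have hout : ∀ e : String, e ∉ hillOrder →
      (List.foldl (fun d e => d.erase e) ((d.erase "C").erase "H") (List.drop 2 hillOrder)).getD e 0
        = d.getD e 0 := by
    intro e he
    rw [pv_getD_foldl_erase _ _ _ (fun hc => he ((hm e).mpr (Or.inr (Or.inr hc)))),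
      pv_getD_erase_of_ne _ _ _ _ (fun hc => he ((hm e).mpr (Or.inr (Or.inl hc)))),
      pv_getD_erase_of_ne _ _ _ _ (fun hc => he ((hm e).mpr (Or.inl hc)))]
  have hmemS : ∀ e ∈ PySem.List.sorted (List.filter (fun e => !decide (e ∈ hillOrder)) d.keys) (fun x => x) false,
      e ∉ hillOrder := by
    intro e he
    have := (PySem.List.mem_sorted _ _ _ _).mp he
    simpa using (List.mem_filter.mp this).2
  have hs1 : List.filter (fun e => decide
        ((List.foldl (fun d e => d.erase e) ((d.erase "C").erase "H") (List.drop 2 hillOrder)).getD e 0 ≠ 0))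
        (PySem.List.sorted (List.filter (fun e => !decide (e ∈ hillOrder)) d.keys) (fun x => x) false)
      = List.filter (pvKeep d)
        (PySem.List.sorted (List.filter (fun e => !decide (e ∈ hillOrder)) d.keys) (fun x => x) false) :=
    List.filter_congr (fun e he => by simp only [pvKeep, hout e (hmemS e he)])
  rw [hs1]
  have hs2 : List.map (fun e => e ++
        if (List.foldl (fun d e => d.erase e) ((d.erase "C").erase "H") (List.drop 2 hillOrder)).getD e 0 > 1 then
          PySem.Int.toStr
            ((List.foldl (fun d e => d.erase e) ((d.erase "C").erase "H") (List.drop 2 hillOrder)).getD e 0)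
        else "")
        (List.filter (pvKeep d)
          (PySem.List.sorted (List.filter (fun e => !decide (e ∈ hillOrder)) d.keys) (fun x => x) false))
      = List.map (pvPc d)
        (List.filter (pvKeep d)
          (PySem.List.sorted (List.filter (fun e => !decide (e ∈ hillOrder)) d.keys) (fun x => x) false)) :=
    List.map_eq_map_iff.mpr (fun e he => by
      simp only [pvPc, hout e (hmemS e (List.mem_of_mem_filter he))])
  rw [hs2]
  -- the drop-2 chunk: erase "C"/"H" does not change getD there
  have hdr : ∀ e ∈ List.drop 2 hillOrder, ((d.erase "C").erase "H").getD e 0 = d.getD e 0 := by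
    intro e he
    rw [pv_getD_erase_of_ne _ _ _ _ (hcd e he).2, pv_getD_erase_of_ne _ _ _ _ (hcd e he).1]
  have hm1 : List.filter (fun e => decide (((d.erase "C").erase "H").getD e 0 ≠ 0)) (List.drop 2 hillOrder)
      = List.filter (pvKeep d) (List.drop 2 hillOrder) :=
    List.filter_congr (fun e he => by simp only [pvKeep, hdr e he])
  rw [hm1]
  have hm2 : List.map (fun e => e ++
        if ((d.erase "C").erase "H").getD e 0 > 1 then PySem.Int.toStr (((d.erase "C").erase "H").getD e 0) else "")
        (List.filter (pvKeep d) (List.drop 2 hillOrder))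
      = List.map (pvPc d) (List.filter (pvKeep d) (List.drop 2 hillOrder)) :=
    List.map_eq_map_iff.mpr (fun e he => by
      simp only [pvPc, hdr e (List.mem_of_mem_filter he)])
  rw [hm2]
  have hkm : ∀ x : String, x ∉ d.keys → d.getD x 0 = 0 := by
    intro x hx
    refine PySem.Dict.getD_of_not_contains _ _ ?_
    rcases hcon : d.contains x
    · rfl
    · exact absurd ((PySem.Dict.contains_iff_mem_keys _ _).mp hcon) hx
  have hff : List.filter (pvKeep d) (List.filter (fun e => decide (e ∈ d.keys)) hillOrder)
      = List.filter (pvKeep d) hillOrder := by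
    rw [List.filter_filter]
    exact List.filter_congr (fun x _ => by
      by_cases hx : x ∈ d.keys
      · simp [hx]
      · simp [hx, pvKeep, hkm x hx])
  have hcons : List.filter (pvKeep d) hillOrder
      = (if pvKeep d "C" then ["C"] else []) ++
        ((if pvKeep d "H" then ["H"] else []) ++ List.filter (pvKeep d) (List.drop 2 hillOrder)) := by
    conv_lhs => rw [show hillOrder = "C" :: "H" :: List.drop 2 hillOrder from rfl]
    by_cases hC : pvKeep d "C" <;> by_cases hH : pvKeep d "H" <;>
      simp [hC, hH]
  have hfin : ((if d.getD "H" 0 ≠ 0 then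
        (if d.getD "C" 0 ≠ 0 then
            [] ++ ["C" ++ if d.getD "C" 0 > 1 then PySem.Int.toStr (d.getD "C" 0) else ""]
          else []) ++
          ["H" ++ if d.getD "H" 0 > 1 then PySem.Int.toStr (d.getD "H" 0) else ""]
      else
        if d.getD "C" 0 ≠ 0 then
          [] ++ ["C" ++ if d.getD "C" 0 > 1 then PySem.Int.toStr (d.getD "C" 0) else ""]
        else []) ++
      List.map (pvPc d) (List.filter (pvKeep d) (List.drop 2 hillOrder)) ++
      List.map (pvPc d) (List.filter (pvKeep d)
        (PySem.List.sorted (List.filter (fun e => !decide (e ∈ hillOrder)) d.keys) (fun x => x) false))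
      : List String) = pvList atoms := by
    simp only [pvList, List.filter_append, List.map_append, ← hd]
    rw [hff, hcons]
    by_cases hC : d.getD "C" 0 ≠ 0 <;> by_cases hH : d.getD "H" 0 ≠ 0 <;>
      simp [pvKeep, pvPc, hC, hH]
  rw [hfin]

theorem pv_B_parts (atoms : List (String × Int)) :
    hill_string_alt atoms = PySem.Str.join "" (pvList atoms) := by
  simp only [hill_string_alt]
  rw [show (PySem.List.enumerate hillOrder).foldl
        (fun (r : PySem.Dict String Int) p => r.insert p.2 p.1) PySem.Dict.empty = pvRank from rfl]
  rw [show PySem.List.len hillOrder = (57 : Int) from rfl]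
  rw [pv_sorted2_eq_sorted, pv_sorted_keys _ (PySem.Dict.nodup_keys_ofList atoms)]
  rw [pv_emit_loop]
  simp only [pvList, List.nil_append]
  rfl

-- ===== VERDICT =====
theorem hill_string_spec : Claim_equal_hill_string := by
  intro atoms _
  unfold Spec_hill_string
  rw [pv_A_parts, pv_B_parts]
  by_cases h : pvList atoms = [] <;> simp [h]
  rfl
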